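-- pv_equiv track=rewrite | github.com/MasamiYui/video-voice-separate | src/translip/transcription/diarization/projection.py | _speaker_runs
-- ===== SOURCE A (Python) =====
-- def _speaker_runs(ids: list[int]) -> list[tuple[int, int, int]]:
--     """Return ``[(speaker_id, start_index, end_index_exclusive), ...]`` runs."""
--
--     if not ids:
--         return []
--     runs: list[tuple[int, int, int]] = []
--     run_start = 0
--     current = ids[0]
--     for index in range(1, len(ids)):
--         if ids[index] != current:
--             runs.append((current, run_start, index))
--             run_start = index
--             current = ids[index]
--     runs.append((current, run_start, len(ids)))
--     return runs
-- ===== SOURCE B (Python) =====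
-- def _speaker_runs(ids: list[int]) -> list[tuple[int, int, int]]:
--     """Return ``[(speaker_id, start_index, end_index_exclusive), ...]`` runs."""
--
--     if not ids:
--         return []
--     n = len(ids)
--     boundaries = [0] + [i for i in range(1, n) if ids[i] != ids[i - 1]] + [n]
--     runs: list[tuple[int, int, int]] = []
--     for b, c in zip(boundaries, boundaries[1:]):
--         runs.append((ids[b], b, c))
--     return runs
-- ===== Notes on version B (the rewrite author's own statement) =====
-- stated objective: alternative
-- what changed: Replaces the single stateful run-tracking loop (current speaker + run start carried across iterations) with a two-pass boundary-table decomposition: first collect all run-split indices, then emit one run per adjacent boundary pair.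
import Mathlib
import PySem

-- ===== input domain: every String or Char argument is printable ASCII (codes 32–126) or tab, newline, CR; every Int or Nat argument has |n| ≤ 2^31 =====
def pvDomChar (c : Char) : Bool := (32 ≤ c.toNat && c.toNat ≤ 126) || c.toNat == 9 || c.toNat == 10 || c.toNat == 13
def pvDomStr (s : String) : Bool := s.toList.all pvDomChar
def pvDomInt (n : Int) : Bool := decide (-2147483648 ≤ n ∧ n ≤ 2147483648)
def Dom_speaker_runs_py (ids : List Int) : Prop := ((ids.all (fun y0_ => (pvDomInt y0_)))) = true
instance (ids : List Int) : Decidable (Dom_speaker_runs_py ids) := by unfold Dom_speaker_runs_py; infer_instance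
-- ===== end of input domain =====

-- B replaces A's single stateful run-tracking loop by a boundary-index table plus an
-- adjacent-pair pass (alternative decomposition, same O(n) cost).

-- ===== PORT A =====
-- A's `for index in range(1, len(ids))` loop, transliterated as a while-style recursion on
-- the index; `ids[index]` is always in range here, so `List.getD` is exact.
def speakerRunsLoopA (ids : List Int) (n index : Nat) (current : Int) (run_start : Nat)
    (runs : List (Int × Int × Int)) : List (Int × Int × Int) :=
  if _h : index < n then
    let x := ids.getD index 0
    if x ≠ current then
      speakerRunsLoopA ids n (index + 1) x index (runs ++ [(current, (run_start : Int), (index : Int))])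
    else
      speakerRunsLoopA ids n (index + 1) current run_start runs
  else
    runs ++ [(current, (run_start : Int), (n : Int))]
  termination_by n - index

def speaker_runs_py (ids : List Int) : List (Int × Int × Int) :=
  if ids = [] then []
  else speakerRunsLoopA ids ids.length 1 (ids.getD 0 0) 0 []

-- ===== PORT B =====
-- `zip(boundaries, boundaries[1:])` ported as a recursion over adjacent pairs; `ids[b]` is
-- always a boundary index < n, so `List.getD` is exact.
def speakerRunsPairsB (ids : List Int) : List Nat → List (Int × Int × Int)
  | b :: c :: rest => (ids.getD b 0, (b : Int), (c : Int)) :: speakerRunsPairsB ids (c :: rest)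
  | _ => []

def speaker_runs_py_alt (ids : List Int) : List (Int × Int × Int) :=
  if ids = [] then []
  else
    let n := ids.length
    let boundaries : List Nat :=
      0 :: ((List.range' 1 (n - 1)).filter (fun i => ids.getD i 0 ≠ ids.getD (i - 1) 0)) ++ [n]
    speakerRunsPairsB ids boundaries

-- ===== PRECONDITION & SPEC =====
def Spec_speaker_runs_py (ids : List Int) (out : List (Int × Int × Int)) : Prop := out = speaker_runs_py_alt ids
instance (ids : List Int) (out : List (Int × Int × Int)) : Decidable (Spec_speaker_runs_py ids out) := by unfold Spec_speaker_runs_py; infer_instance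

-- ===== CLAIM (what is proved, stated in full; the proofs are below) =====
def Claim_equal_speaker_runs_py : Prop := ∀ (ids : List Int), Dom_speaker_runs_py ids → Spec_speaker_runs_py ids (speaker_runs_py ids)

-- ===== LEMMAS AND PROOFS =====

-- Reference run-length encoding by structural recursion on the suffix starting at `idx`.
def specRuns (cur : Int) (rs idx : Nat) : List Int → List (Int × Int × Int)
  | [] => [(cur, (rs : Int), (idx : Int))]
  | x :: xs =>
    if x ≠ cur then (cur, (rs : Int), (idx : Int)) :: specRuns x idx (idx + 1) xs
    else specRuns cur rs (idx + 1) xs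

lemma getD_drop_cons {ids l : List Int} {x : Int} {idx : Nat}
    (hd : ids.drop idx = x :: l) : ids.getD idx 0 = x := by
  have h0 : (ids.drop idx)[0]? = ids[idx + 0]? := List.getElem?_drop ..
  rw [hd] at h0
  simp only [List.getElem?_cons_zero, Nat.add_zero] at h0
  simp [List.getD, ← h0]

lemma drop_succ_of_drop_cons {ids l : List Int} {x : Int} {idx : Nat}
    (hd : ids.drop idx = x :: l) : ids.drop (idx + 1) = l := by
  simpa [List.drop_drop, Nat.add_comm] using congrArg (List.drop 1) hd

lemma loopA_eq_spec (ids : List Int) :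
    ∀ (l : List Int) (idx : Nat) (cur : Int) (rs : Nat) (runs : List (Int × Int × Int)),
      ids.drop idx = l → idx ≤ ids.length →
      speakerRunsLoopA ids ids.length idx cur rs runs = runs ++ specRuns cur rs idx l := by
  intro l
  induction l with
  | nil =>
    intro idx cur rs runs hd hle
    have hge : ids.length ≤ idx := by
      by_contra h
      have := List.drop_eq_nil_iff.mp hd
      omega
    have hidx : idx = ids.length := le_antisymm hle hge
    rw [speakerRunsLoopA]
    simp [specRuns, hidx]
  | cons x xs ih =>
    intro idx cur rs runs hd hle
    have hlt : idx < ids.length := by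
      by_contra h
      simp [List.drop_eq_nil_of_le (Nat.le_of_not_lt h)] at hd
    have hx : ids.getD idx 0 = x := getD_drop_cons hd
    have hd' : ids.drop (idx + 1) = xs := drop_succ_of_drop_cons hd
    rw [speakerRunsLoopA]
    simp only [hlt, dif_pos, hx]
    by_cases hne : x = cur
    · simp [hne, specRuns, ih (idx + 1) cur rs runs hd' hlt]
    · simp [hne, specRuns, ih (idx + 1) x idx (runs ++ [(cur, (rs : Int), (idx : Int))]) hd' hlt]

lemma range'_interior (n i : Nat) (h : i < n) :
    List.range' i (n - i) = i :: List.range' (i + 1) (n - (i + 1)) := by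
  have : n - i = (n - (i + 1)) + 1 := by omega
  rw [this, List.range'_succ]

lemma pairsB_eq_spec (ids : List Int) :
    ∀ (l : List Int) (idx rs : Nat),
      ids.drop idx = l → 1 ≤ idx → idx ≤ ids.length →
      ids.getD rs 0 = ids.getD (idx - 1) 0 →
      speakerRunsPairsB ids
        (rs :: ((List.range' idx (ids.length - idx)).filter
          (fun i => ids.getD i 0 ≠ ids.getD (i - 1) 0)) ++ [ids.length])
      = specRuns (ids.getD rs 0) rs idx l := by
  intro l
  induction l with
  | nil =>
    intro idx rs hd h1 hle hcur
    have hge : ids.length ≤ idx := by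
      by_contra h
      have := List.drop_eq_nil_iff.mp hd
      omega
    have hidx : idx = ids.length := le_antisymm hle hge
    subst hidx
    simp [speakerRunsPairsB, specRuns]
  | cons x xs ih =>
    intro idx rs hd h1 hle hcur
    have hlt : idx < ids.length := by
      by_contra h
      simp [List.drop_eq_nil_of_le (Nat.le_of_not_lt h)] at hd
    have hx : ids.getD idx 0 = x := getD_drop_cons hd
    have hd' : ids.drop (idx + 1) = xs := drop_succ_of_drop_cons hd
    have hprev : ids.getD (idx - 1) 0 = ids.getD rs 0 := hcur.symm
    rw [range'_interior _ _ hlt]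
    by_cases hne : x = ids.getD rs 0
    · -- no boundary at idx: ids[idx] = ids[idx-1]
      have heq : ids.getD idx 0 = ids.getD (idx - 1) 0 := by rw [hx, hprev, hne]
      have hb : (decide (ids.getD idx 0 ≠ ids.getD (idx - 1) 0)) = false := by
        rw [heq]; simp
      rw [List.filter_cons, hb]
      simp only [Bool.false_eq_true, if_false]
      rw [specRuns, if_neg (not_not_intro hne)]
      exact ih (idx + 1) rs hd' (by omega) hlt
        (by rw [Nat.add_sub_cancel, hx]; exact hne.symm)
    · -- boundary at idx: a new run starts here
      have hneq : ids.getD idx 0 ≠ ids.getD (idx - 1) 0 := by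
        rw [hx, hprev]; exact hne
      rw [List.filter_cons, decide_eq_true hneq]
      simp only [if_true]
      rw [specRuns, if_pos hne]
      have hih := ih (idx + 1) idx hd' (by omega) hlt (by simp)
      rw [List.cons_append] at hih
      simp only [List.cons_append]
      rw [speakerRunsPairsB, hih, hx]

-- ===== VERDICT (by name: the statement is the Claim_ definition above) =====
theorem speaker_runs_py_spec : Claim_equal_speaker_runs_py := by
  intro ids _
  unfold Spec_speaker_runs_py speaker_runs_py speaker_runs_py_alt
  by_cases h : ids = []
  · simp [h]
  · simp only [h, if_false]
    have hlen : 1 ≤ ids.length := by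
      cases ids with
      | nil => exact absurd rfl h
      | cons a l => simp
    rw [loopA_eq_spec ids (ids.drop 1) 1 (ids.getD 0 0) 0 [] rfl hlen]
    have := pairsB_eq_spec ids (ids.drop 1) 1 0 rfl le_rfl hlen (by simp)
    simp only [List.nil_append]
    rw [← this]
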